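-- pv_equiv track=rewrite | github.com/CimarRodrigo/ProyectoTkinter | funciones.py | hex_a_dec
-- ===== SOURCE A (Python) =====
-- def hex_a_dec (hexa):
--     suma =0
--     posicion = 0
--     while(hexa >= 1):
--         aux = hexa % 10
--         hexa = hexa // 10
--         suma=suma + aux * pow(16, posicion);
--         posicion += 1
--     return(suma)
-- ===== SOURCE B (Python) =====
-- def hex_a_dec(hexa):
--     # Horner's rule by recursion on the decimal digits: no position counter, no pow.
--     if hexa < 1:
--         return 0
--     return hex_a_dec(hexa // 10) * 16 + hexa % 10
-- ===== Notes on version B (the rewrite author's own statement) =====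
-- stated objective: simpler
-- what changed: Replaces the iterative least-significant-digit loop with an explicit position counter and a per-digit power-of-sixteen weighting by a recursive Horner evaluation over the decimal digits, with no counter, no pow and no accumulator.
import Mathlib
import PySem

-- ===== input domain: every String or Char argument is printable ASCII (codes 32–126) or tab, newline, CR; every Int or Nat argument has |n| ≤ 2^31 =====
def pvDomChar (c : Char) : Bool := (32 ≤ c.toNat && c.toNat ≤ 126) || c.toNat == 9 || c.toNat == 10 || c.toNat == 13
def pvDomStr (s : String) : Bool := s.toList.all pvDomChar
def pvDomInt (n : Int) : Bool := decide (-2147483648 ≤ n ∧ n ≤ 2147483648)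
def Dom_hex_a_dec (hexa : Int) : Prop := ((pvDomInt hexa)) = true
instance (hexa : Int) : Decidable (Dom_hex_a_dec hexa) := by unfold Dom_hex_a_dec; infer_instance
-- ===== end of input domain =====

-- B replaces A's iterative loop (position counter plus per-digit power-of-sixteen weighting) by a
-- recursive Horner evaluation over the decimal digits; objective: simpler.


-- ===== PORT A =====
-- while(hexa >= 1): aux = hexa % 10; hexa = hexa // 10; suma += aux * pow(16, posicion); posicion += 1
-- posicion starts at 0 and only increases, so pow(16, posicion) is 16 ^ posicion.toNat.
def hexALoop (hexa suma posicion : Int) : Int :=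
  if 1 ≤ hexa then
    hexALoop (PySem.Int.floordiv hexa 10)
      (suma + PySem.Int.mod hexa 10 * (16 : Int) ^ posicion.toNat) (posicion + 1)
  else suma
termination_by hexa.toNat
decreasing_by
  simp only [PySem.Int.floordiv_eq_ediv_of_pos (by norm_num : (0:Int) < 10)]
  omega

def hex_a_dec (hexa : Int) : Int := hexALoop hexa 0 0

-- ===== PORT B =====
def hex_a_dec_alt (hexa : Int) : Int :=
  if hexa < 1 then 0
  else hex_a_dec_alt (PySem.Int.floordiv hexa 10) * 16 + PySem.Int.mod hexa 10
termination_by hexa.toNat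
decreasing_by
  simp only [PySem.Int.floordiv_eq_ediv_of_pos (by norm_num : (0:Int) < 10)]
  omega

-- ===== PRECONDITION & SPEC =====
def Spec_hex_a_dec (hexa : Int) (out : Int) : Prop := out = hex_a_dec_alt hexa
instance (hexa : Int) (out : Int) : Decidable (Spec_hex_a_dec hexa out) := by unfold Spec_hex_a_dec; infer_instance

-- ===== CLAIM (what is proved, stated in full; the proofs are below) =====
def Claim_equal_hex_a_dec : Prop := ∀ (hexa : Int), Dom_hex_a_dec hexa → Spec_hex_a_dec hexa (hex_a_dec hexa)

-- ===== LEMMAS AND PROOFS =====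

-- A's loop accumulates exactly B's Horner value, shifted by the current position weight.
theorem hexALoop_eq_aux : ∀ (k : Nat) (hexa : Int), hexa.toNat ≤ k → ∀ (suma posicion : Int), 0 ≤ posicion →
    hexALoop hexa suma posicion = suma + hex_a_dec_alt hexa * (16 : Int) ^ posicion.toNat := by
  intro k
  induction k with
  | zero =>
    intro n hn suma posicion hp
    rw [hexALoop, hex_a_dec_alt, if_neg (by omega), if_pos (by omega)]; ring
  | succ k ih =>
    intro n hn suma posicion hp
    rw [hexALoop, hex_a_dec_alt]
    by_cases h : 1 ≤ n
    · have hle : (PySem.Int.floordiv n 10).toNat ≤ k := by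
        simp only [PySem.Int.floordiv_eq_ediv_of_pos (by norm_num : (0:Int) < 10)]
        omega
      rw [if_pos h, if_neg (by omega), ih _ hle _ _ (by omega)]
      have : (posicion + 1).toNat = posicion.toNat + 1 := by omega
      rw [this]; ring
    · rw [if_neg h, if_pos (by omega)]; ring

theorem hexALoop_eq (hexa suma posicion : Int) (hp : 0 ≤ posicion) :
    hexALoop hexa suma posicion = suma + hex_a_dec_alt hexa * (16 : Int) ^ posicion.toNat :=
  hexALoop_eq_aux hexa.toNat hexa le_rfl suma posicion hp

-- ===== VERDICT (by name: the statement is the Claim_ definition above) =====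
theorem hex_a_dec_spec : Claim_equal_hex_a_dec := by
  intro hexa _
  unfold Spec_hex_a_dec hex_a_dec
  rw [hexALoop_eq _ _ _ le_rfl]
  simp
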